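-- pv_equiv track=rewrite | github.com/wangweiran0129/advent_of_code | day9/day9.py | move_file_blocks
-- ===== SOURCE A (Python) =====
-- def count_consecutive_digits(individual_block):
--
--     count = 0
--     for ele in individual_block:
--         if ele == '.':
--             break
--         count += 1
--
--     return count
--
-- def move_file_blocks(individual_block):
--
--     # Count how many digits in the individual_block
--     count = 0
--     for ele in individual_block:
--         if ele != '.':
--             count += 1
--
--     offset = -1
--     for idx in range(0, len(individual_block)):
--         if individual_block[idx] == '.':
--             if count_consecutive_digits(individual_block) == count:
--                 break
--             while individual_block[offset] == '.':
--                 offset -= 1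
--             individual_block[idx], individual_block[offset] = individual_block[offset], individual_block[idx]
--             offset -= 1
--
--     return individual_block
-- ===== SOURCE B (Python) =====
-- def move_file_blocks(individual_block):
--     res = individual_block
--     i, j = 0, len(res) - 1
--     while i < j:
--         if res[i] != '.':
--             i += 1
--         elif res[j] == '.':
--             j -= 1
--         else:
--             res[i], res[j] = res[j], res[i]
--             i += 1
--             j -= 1
--     return res
-- ===== Notes on version B (the rewrite author's own statement) =====
-- stated objective: simpler
-- what changed: Replaces A's outer index scan with its per-gap re-count of the leading block run and separate backwards-scanning negative offset by a single self-contained two-pointer loop that swaps the leftmost gap with the rightmost block and stops when the pointers meet.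
import Mathlib
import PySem

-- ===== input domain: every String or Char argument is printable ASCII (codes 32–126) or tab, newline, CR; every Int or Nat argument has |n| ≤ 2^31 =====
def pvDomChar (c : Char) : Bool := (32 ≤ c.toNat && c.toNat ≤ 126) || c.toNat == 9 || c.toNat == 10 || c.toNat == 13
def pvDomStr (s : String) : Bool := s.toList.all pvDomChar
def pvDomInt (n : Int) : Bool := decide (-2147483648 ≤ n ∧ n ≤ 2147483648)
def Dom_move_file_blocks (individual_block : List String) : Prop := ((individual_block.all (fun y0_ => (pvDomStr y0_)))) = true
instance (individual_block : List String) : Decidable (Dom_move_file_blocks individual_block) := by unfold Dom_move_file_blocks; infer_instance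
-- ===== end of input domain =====

-- B replaces A's swap loop (which re-counts the leading block run on every gap to decide
-- whether to stop, and keeps a separate backwards-scanning negative offset) by a single,
-- simpler two-pointer loop; equivalence is about the returned list (both Pythons mutate
-- the argument in place in the same way).

-- ===== PORT A =====
-- helper count_consecutive_digits: count = 0; for ele: if ele == '.': break; count += 1
def pvA_ccd_go : List String → Int → Int
  | [], count => count
  | ele :: rest, count => if ele = "." then count else pvA_ccd_go rest (count + 1)

def count_consecutive_digits (individual_block : List String) : Int :=
  pvA_ccd_go individual_block 0

-- while individual_block[offset] == '.': offset -= 1   (fuel only makes the loop total;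
-- A's while always terminates in ≤ length+1 steps before the fuel runs out)
def pvA_find (blk : List String) : Nat → Int → Int
  | 0, off => off
  | fuel + 1, off =>
      if PySem.List.pyGet? blk off = some "." then pvA_find blk fuel (off - 1) else off

-- the body of `for idx in range(0, len(individual_block))`, as a counter recursion;
-- `break` returns the list (nothing after the loop).
def pvA_loop (count : Int) (blk : List String) (off : Int) (idx : Nat) : List String :=
  if _h : idx < blk.length then
    if PySem.List.pyGet? blk (idx : Int) = some "." then
      if count_consecutive_digits blk = count then blk
      else
        let off' := pvA_find blk (blk.length + 1) off
        let a := PySem.List.pyGetD blk (idx : Int) ""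
        let b := PySem.List.pyGetD blk off' ""
        let blk' := PySem.List.pySetD (PySem.List.pySetD blk (idx : Int) b) off' a
        pvA_loop count blk' (off' - 1) (idx + 1)
    else pvA_loop count blk off (idx + 1)
  else blk
termination_by blk.length - idx
decreasing_by
  · simp only [PySem.List.length_pySetD]; omega
  · omega

def move_file_blocks (individual_block : List String) : List String :=
  let count := individual_block.foldl (fun c ele => if ele ≠ "." then c + 1 else c) 0
  pvA_loop count individual_block (-1) 0

-- ===== PORT B =====
-- two-pointer compaction: i scans right for gaps, j scans left for blocks, swap, stop at i ≥ j
def pvB_loop (res : List String) (i j : Nat) : List String :=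
  if _h : i < j then
    if res.getD i "" ≠ "." then pvB_loop res (i + 1) j
    else if res.getD j "" = "." then pvB_loop res i (j - 1)
    else pvB_loop ((res.set i (res.getD j "")).set j (res.getD i "")) (i + 1) (j - 1)
  else res
termination_by j - i

def move_file_blocks_alt (individual_block : List String) : List String :=
  pvB_loop individual_block 0 (individual_block.length - 1)

-- ===== PRECONDITION & SPEC =====
def Spec_move_file_blocks (individual_block : List String) (out : List String) : Prop := out = move_file_blocks_alt individual_block
instance (individual_block : List String) (out : List String) : Decidable (Spec_move_file_blocks individual_block out) := by unfold Spec_move_file_blocks; infer_instance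

-- ===== CLAIM (what is proved, stated in full; the proofs are below) =====
def Claim_equal_move_file_blocks : Prop := ∀ (individual_block : List String), Dom_move_file_blocks individual_block → Spec_move_file_blocks individual_block (move_file_blocks individual_block)

-- ===== LEMMAS AND PROOFS =====

-- Bool predicate "is a file block" (≠ '.'), used only by the proofs
def pvND (e : String) : Bool := !(e == ".")

theorem pvA_ccd_go_eq (l : List String) (c : Int) :
    pvA_ccd_go l c = c + ((l.takeWhile pvND).length : Int) := by
  induction l generalizing c with
  | nil => simp [pvA_ccd_go]
  | cons e r ih =>
      by_cases h : e = "."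
      · simp [pvA_ccd_go, pvND, h]
      · simp [pvA_ccd_go, pvND, h, ih]
        omega

theorem pvA_ccd_eq (l : List String) :
    count_consecutive_digits l = ((l.takeWhile pvND).length : Int) := by
  simp [count_consecutive_digits, pvA_ccd_go_eq]

theorem pvA_count_eq (l : List String) (init : Int) :
    l.foldl (fun c ele => if ele ≠ "." then c + 1 else c) init
      = init + (l.countP pvND : Int) := by
  induction l generalizing init with
  | nil => simp
  | cons e r ih =>
      rw [List.foldl_cons]
      by_cases h : e = "."
      · rw [show (if e ≠ "." then init + 1 else init) = init by simp [h], ih]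
        simp [pvND, h]
      · rw [show (if e ≠ "." then init + 1 else init) = init + 1 by simp [h], ih]
        simp [pvND, h]
        omega

theorem pvSetD_neg (xs : List String) (k : Nat) (v : String) (h0 : 0 < k)
    (hk : k ≤ xs.length) :
    PySem.List.pySetD xs (-(k : Int)) v = xs.set (xs.length - k) v := by
  simp [PySem.List.pySetD, PySem.List.pySet?, PySem.List.pyIdx?, hk, Nat.pos_iff_ne_zero.mp h0]

theorem pv_get_sub (blk : List String) (j : Nat) (hj : j < blk.length) :
    PySem.List.pyGet? blk ((j : Int) - blk.length) = some blk[j] := by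
  have h1 : ((j : Int) - blk.length) = -(((blk.length - j : Nat)) : Int) := by
    push_cast [Nat.cast_sub hj.le]; ring
  rw [h1, PySem.List.pyGet?_neg_natCast blk _ (by omega) (by omega)]
  have h2 : blk.length - (blk.length - j) = j := by omega
  rw [h2, List.getElem?_eq_getElem hj]

theorem pv_getD_sub (blk : List String) (j : Nat) (hj : j < blk.length) :
    PySem.List.pyGetD blk ((j : Int) - blk.length) "" = blk[j] := by
  have h1 : ((j : Int) - blk.length) = -(((blk.length - j : Nat)) : Int) := by
    push_cast [Nat.cast_sub hj.le]; ring
  rw [h1, PySem.List.pyGetD_neg_natCast blk _ "" (by omega) (by omega)]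
  congr 1
  omega

theorem pv_setD_sub (blk : List String) (j : Nat) (v : String) (hj : j < blk.length) :
    PySem.List.pySetD blk ((j : Int) - blk.length) v = blk.set j v := by
  have h1 : ((j : Int) - blk.length) = -(((blk.length - j : Nat)) : Int) := by
    push_cast [Nat.cast_sub hj.le]; ring
  rw [h1, pvSetD_neg blk _ v (by omega) (by omega)]
  congr 1
  omega

theorem pv_tw_len_of_prefix (l : List String) (idx : Nat) (hlen : idx < l.length)
    (hpre : ∀ p, p < idx → ∀ hp : p < l.length, l[p] ≠ ".")
    (hdot : l[idx] = ".") : (l.takeWhile pvND).length = idx := by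
  induction l generalizing idx with
  | nil => simp at hlen
  | cons e r ih =>
      cases idx with
      | zero => simp_all [pvND]
      | succ m =>
          have he : e ≠ "." := by
            have := hpre 0 (by omega) (by simp)
            simpa using this
          have hr : (r.takeWhile pvND).length = m := by
            apply ih m (by simpa using hlen)
            · intro p hp hpl
              have := hpre (p + 1) (by omega) (by simpa using hpl)
              simpa using this
            · simpa using hdot
          simp [pvND, he, hr]

theorem pv_countP_split (l : List String) (idx : Nat) (hlen : idx ≤ l.length)
    (hpre : ∀ p, p < idx → ∀ hp : p < l.length, l[p] ≠ ".") :
    l.countP pvND = idx + (l.drop idx).countP pvND := by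
  conv_lhs => rw [← List.take_append_drop idx l]
  rw [List.countP_append]
  congr 1
  have hall : ∀ a ∈ l.take idx, pvND a := by
    intro a ha
    obtain ⟨p, hp, rfl⟩ := List.mem_iff_getElem.mp ha
    have hp' : p < idx := by simp at hp; omega
    have hpl : p < l.length := by omega
    have := hpre p hp' hpl
    simp [pvND, List.getElem_take]
    simpa [List.getElem_take] using this
  rw [List.countP_eq_length.mpr hall]
  simp [hlen]

theorem pv_tw_eq_countP (l : List String)
    (hmono : ∀ p q (hp : p < l.length) (hq : q < l.length), p ≤ q → l[p] = "." → l[q] = ".") :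
    (l.takeWhile pvND).length = l.countP pvND := by
  induction l with
  | nil => simp
  | cons e r ih =>
      by_cases he : e = "."
      · have hall : ∀ x ∈ r, ¬ pvND x = true := by
          intro x hx
          obtain ⟨k, hk, rfl⟩ := List.mem_iff_getElem.mp hx
          have : (e :: r)[k + 1]'(by simpa using hk) = "." := by
            apply hmono 0 (k + 1) (by simp) (by simpa using hk) (by omega)
            simpa using he
          simp [pvND]
          simpa using this
        simp [pvND, he, List.countP_eq_zero.mpr hall]
      · have hr := ih (by
          intro p q hp hq hpq hdot
          have := hmono (p + 1) (q + 1) (by simpa using hp) (by simpa using hq) (by omega)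
            (by simpa using hdot)
          simpa using this)
        simp [pvND, he, hr]

theorem pvA_loop_done (count : Int) (blk : List String) (off : Int) (idx : Nat)
    (hcnt : count = (blk.countP pvND : Int))
    (hmono : ∀ p q (hp : p < blk.length) (hq : q < blk.length), p ≤ q → blk[p] = "." → blk[q] = ".") :
    pvA_loop count blk off idx = blk := by
  by_cases hlt : idx < blk.length
  · rw [pvA_loop]
    simp only [hlt, dif_pos]
    rw [PySem.List.pyGet?_natCast]
    by_cases he : blk[idx] = "."
    · simp [List.getElem?_eq_getElem hlt, he, pvA_ccd_eq, pv_tw_eq_countP blk hmono, hcnt]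
    · have : blk[idx]? = some blk[idx] := List.getElem?_eq_getElem hlt
      simp only [this]
      rw [if_neg (by simpa using he)]
      exact pvA_loop_done count blk off (idx + 1) hcnt hmono
  · rw [pvA_loop]; simp [hlt]
termination_by blk.length - idx
decreasing_by omega

theorem pvA_find_spec (blk : List String) (j : Nat) :
    ∀ fuel : Nat, j < blk.length → j + 1 ≤ fuel →
    (∃ p, p ≤ j ∧ ∃ hp : p < blk.length, blk[p] ≠ ".") →
    ∃ j', j' ≤ j ∧ ∃ hj' : j' < blk.length, blk[j'] ≠ "." ∧
      (∀ p, j' < p → p ≤ j → ∀ hp : p < blk.length, blk[p] = ".") ∧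
      pvA_find blk fuel ((j : Int) - blk.length) = (j' : Int) - blk.length := by
  induction j with
  | zero =>
      intro fuel hj hfuel hex
      obtain ⟨p, hp0, hpl, hpd⟩ := hex
      have hp : p = 0 := by omega
      subst hp
      obtain ⟨fuel, rfl⟩ : ∃ f, fuel = f + 1 := ⟨fuel - 1, by omega⟩
      refine ⟨0, le_refl _, hpl, hpd, by omega, ?_⟩
      rw [pvA_find, pv_get_sub blk 0 hpl, if_neg (by simpa using hpd)]
  | succ m ih =>
      intro fuel hj hfuel hex
      obtain ⟨fuel, rfl⟩ : ∃ f, fuel = f + 1 := ⟨fuel - 1, by omega⟩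
      have hml : m + 1 < blk.length := hj
      have hget : PySem.List.pyGet? blk (((m + 1 : Nat) : Int) - blk.length)
          = some blk[m + 1] := pv_get_sub blk (m + 1) hml
      by_cases he : blk[m + 1] = "."
      · -- skip this dot, recurse at m
        obtain ⟨p, hpj, hpl, hpd⟩ := hex
        have hpm : p ≤ m := by
          rcases Nat.lt_or_ge p (m + 1) with h | h
          · omega
          · exfalso; have : p = m + 1 := by omega
            subst this; exact hpd he
        obtain ⟨j', hj'm, hj'l, hj'nd, hdots, heq⟩ :=
          ih fuel (by omega) (by omega) ⟨p, hpm, hpl, hpd⟩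
        refine ⟨j', by omega, hj'l, hj'nd, ?_, ?_⟩
        · intro q hq1 hq2 hql
          rcases Nat.lt_or_ge q (m + 1) with h | h
          · exact hdots q hq1 (by omega) hql
          · have : q = m + 1 := by omega
            subst this; exact he
        · rw [pvA_find, hget, if_pos (by simp [he])]
          have harg : ((m + 1 : Nat) : Int) - blk.length - 1 = ((m : Nat) : Int) - blk.length := by
            push_cast; ring
          rw [harg, heq]
      · -- found it
        refine ⟨m + 1, le_refl _, hml, he, by omega, ?_⟩
        rw [pvA_find, hget, if_neg (by simpa using he)]

theorem pvB_all_dots (blk : List String) (idx : Nat) :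
    ∀ j : Nat, j < blk.length →
    (∀ p, idx ≤ p → ∀ hp : p < blk.length, blk[p] = ".") →
    pvB_loop blk idx j = blk := by
  intro j
  induction j with
  | zero => intro _ _; rw [pvB_loop]; simp
  | succ m ih =>
      intro hj hdots
      rw [pvB_loop]
      by_cases hij : idx < m + 1
      · simp only [hij, dif_pos]
        have hid : blk.getD idx "" = "." := by
          rw [List.getD_eq_getElem blk "" (by omega)]
          exact hdots idx (le_refl _) (by omega)
        have hjd : blk.getD (m + 1) "" = "." := by
          rw [List.getD_eq_getElem blk "" hj]
          exact hdots (m + 1) (by omega) hj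
        rw [if_neg (by simp only [hid]; simp), if_pos hjd]
        exact ih (by omega) hdots
      · simp [hij]

theorem pvB_skip (blk : List String) (idx j' : Nat) :
    ∀ j : Nat, j' ≤ j → j < blk.length →
    (∀ p, j' < p → p ≤ j → ∀ hp : p < blk.length, blk[p] = ".") →
    blk.getD idx "" = "." → idx ≤ j' →
    pvB_loop blk idx j = pvB_loop blk idx j' := by
  intro j
  induction j with
  | zero => intro h _ _ _ _; have : j' = 0 := by omega
            simp [this]
  | succ m ih =>
      intro hle hj hdots hid hij
      by_cases hj' : j' = m + 1
      · simp [hj']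
      · have hlt : idx < m + 1 := by omega
        rw [pvB_loop]
        simp only [hlt, dif_pos]
        have hjd : blk.getD (m + 1) "" = "." := by
          rw [List.getD_eq_getElem blk "" hj]
          exact hdots (m + 1) (by omega) (by omega) hj
        rw [if_neg (by simp only [hid]; simp), if_pos hjd]
        exact ih (by omega) (by omega) (fun p h1 h2 hp => hdots p h1 (by omega) hp) hid hij

theorem pv_loop_main : ∀ (k : Nat) (count : Int) (blk : List String) (idx j : Nat),
    blk.length - idx ≤ k →
    count = (blk.countP pvND : Int) →
    (∀ p, p < idx → ∀ hp : p < blk.length, blk[p] ≠ ".") →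
    (∀ p, j < p → ∀ hp : p < blk.length, blk[p] = ".") →
    idx ≤ j + 1 → j < blk.length →
    pvA_loop count blk ((j : Int) - blk.length) idx = pvB_loop blk idx j := by
  intro k
  induction k with
  | zero =>
      intro count blk idx j hk hcnt hpre hsuf hij hj
      rw [pvA_loop, dif_neg (by omega), pvB_loop, dif_neg (by omega)]
  | succ k ih =>
      intro count blk idx j hk hcnt hpre hsuf hij hj
      by_cases hlt : idx < blk.length
      · rw [pvA_loop, dif_pos hlt]
        have hgetidx : PySem.List.pyGet? blk ((idx : Nat) : Int) = some blk[idx] := by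
          rw [PySem.List.pyGet?_natCast]; exact List.getElem?_eq_getElem hlt
        by_cases he : blk[idx] = "."
        · -- A sees a gap
          rw [if_pos (by rw [hgetidx, he])]
          have hccd : count_consecutive_digits blk = (idx : Int) := by
            rw [pvA_ccd_eq, pv_tw_len_of_prefix blk idx hlt hpre he]
          rw [hccd]
          have hsplit := pv_countP_split blk idx hlt.le hpre
          by_cases hbr : (idx : Int) = count
          · -- already compact: A breaks, B only skips gaps on the right and stops
            rw [if_pos hbr]
            have hdrop : (blk.drop idx).countP pvND = 0 := by
              have : blk.countP pvND = idx := by exact_mod_cast (hcnt ▸ hbr).symm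
              omega
            have hdots : ∀ p, idx ≤ p → ∀ hp : p < blk.length, blk[p] = "." := by
              intro p hp1 hp2
              have hmem : blk[p] ∈ blk.drop idx := by
                rw [List.mem_iff_getElem]
                refine ⟨p - idx, by simp; omega, ?_⟩
                rw [List.getElem_drop]
                congr 1
                omega
              have := List.countP_eq_zero.mp hdrop _ hmem
              simpa [pvND] using this
            exact (pvB_all_dots blk idx j hj hdots).symm
          · -- not compact: locate the rightmost block, swap, continue
            rw [if_neg hbr]
            have hex : ∃ p, idx < p ∧ p ≤ j ∧ ∃ hp : p < blk.length, blk[p] ≠ "." := by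
              have hne : (blk.drop idx).countP pvND ≠ 0 := by
                intro h0
                apply hbr
                rw [hcnt]
                have : blk.countP pvND = idx := by omega
                exact_mod_cast this.symm
              obtain ⟨x, hxmem, hxnd⟩ := List.countP_pos_iff.mp (Nat.pos_of_ne_zero hne)
              obtain ⟨kk, hkk, hxe⟩ := List.mem_iff_getElem.mp hxmem
              have hkk' : idx + kk < blk.length := by
                have := hkk; simp at this; omega
              rw [List.getElem_drop] at hxe
              have hknz : kk ≠ 0 := by
                intro h0
                subst h0
                have hx : x = "." := by rw [← hxe]; simpa using he
                simp [hx, pvND] at hxnd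
              refine ⟨idx + kk, by omega, ?_, hkk', ?_⟩
              · by_contra hgt
                have := hsuf (idx + kk) (by omega) hkk'
                rw [← hxe] at hxnd
                simp [pvND, this] at hxnd
              · rw [← hxe] at hxnd
                simpa [pvND] using hxnd
            obtain ⟨p0, hp0gt, hp0j, hp0l, hp0nd⟩ := hex
            obtain ⟨j', hj'j, hj'len, hj'nd, hj'dots, hfind⟩ :=
              pvA_find_spec blk j (blk.length + 1) hj (by omega) ⟨p0, hp0j, hp0l, hp0nd⟩
            have hij' : idx < j' := by
              by_contra hc
              exact hp0nd (hj'dots p0 (by omega) hp0j hp0l)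
            rw [hfind]
            simp only []
            have ha : PySem.List.pyGetD blk ((idx : Nat) : Int) "" = blk[idx] := by
              rw [PySem.List.pyGetD_natCast]; exact List.getD_eq_getElem blk "" hlt
            have hb : PySem.List.pyGetD blk ((j' : Int) - blk.length) "" = blk[j'] :=
              pv_getD_sub blk j' hj'len
            rw [ha, hb, PySem.List.pySetD_natCast]
            have hset2 : PySem.List.pySetD (blk.set idx blk[j']) ((j' : Int) - blk.length)
                blk[idx] = (blk.set idx blk[j']).set j' blk[idx] := by
              have hl : ((j' : Int) - blk.length) = ((j' : Int) - (blk.set idx blk[j']).length) := by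
                simp
              rw [hl, pv_setD_sub (blk.set idx blk[j']) j' blk[idx] (by simp [hj'len])]
            rw [hset2]
            -- B: skip the same gaps on the right, then the same swap
            have hid : blk.getD idx "" = "." := by
              rw [List.getD_eq_getElem blk "" hlt]; exact he
            rw [pvB_skip blk idx j' j hj'j hj hj'dots hid hij'.le,
              pvB_loop, dif_pos hij']
            rw [if_neg (by simp only [hid]; simp),
              if_neg (by rw [List.getD_eq_getElem blk "" hj'len]; simpa using hj'nd)]
            rw [List.getD_eq_getElem blk "" hj'len, List.getD_eq_getElem blk "" hlt]
            -- both sides continue on the swapped list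
            have harg : (j' : Int) - blk.length - 1
                = (((j' - 1 : Nat)) : Int) - ((blk.set idx blk[j']).set j' blk[idx]).length := by
              push_cast [Nat.cast_sub (show 1 ≤ j' by omega)]
              simp
              ring
            rw [harg]
            have hperm := List.set_set_perm (as := blk) (i := idx) (j := j') hlt hj'len
            apply ih
            · simp; omega
            · rw [hcnt, hperm.countP_eq pvND]
            · intro p hp hpl
              rw [List.getElem_set, List.getElem_set]
              split_ifs with h1 h2
              · omega
              · exact hj'nd
              · exact hpre p (by omega) (by simpa using hpl)
            · intro p hp hpl
              rw [List.getElem_set, List.getElem_set]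
              split_ifs with h1 h2
              · exact he
              · omega
              · have hpl' : p < blk.length := by simpa using hpl
                rcases Nat.lt_or_ge j p with hpj | hpj
                · rcases Nat.lt_or_ge j' p with _ | _
                  · exact hsuf p hpj hpl'
                  · omega
                · exact hj'dots p (by omega) (by omega) hpl'
            · omega
            · simp; omega
        · -- A sees a block: both pointers advance on the left
          rw [if_neg (by rw [hgetidx]; simpa using he)]
          by_cases hij2 : idx < j
          · rw [pvB_loop, dif_pos hij2,
              if_pos (by rw [List.getD_eq_getElem blk "" hlt]; simpa using he)]
            apply ih count blk (idx + 1) j (by omega) hcnt ?_ hsuf (by omega) hj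
            intro p hp hpl
            rcases Nat.lt_or_ge p idx with h | h
            · exact hpre p h hpl
            · have : p = idx := by omega
              subst this; exact he
          · -- idx = j: everything is already compact; A's remaining scan is a no-op
            have hidxj : idx = j := by
              rcases Nat.lt_or_ge idx (j + 1) with h | h
              · omega
              · exfalso
                have : idx = j + 1 := by omega
                exact he (hsuf idx (by omega) hlt)
            have hmono : ∀ p q (hp : p < blk.length) (hq : q < blk.length),
                p ≤ q → blk[p] = "." → blk[q] = "." := by
              intro p q hp hq hpq hdot
              have hpgt : j < p := by
                rcases Nat.lt_or_ge p idx with h | h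
                · exact absurd hdot (hpre p h hp)
                · rcases Nat.lt_or_ge idx p with h2 | h2
                  · omega
                  · exfalso
                    apply he
                    have hpe : p = idx := by omega
                    subst hpe
                    exact hdot
              exact hsuf q (by omega) hq
            rw [pvA_loop_done count blk _ (idx + 1) hcnt hmono, pvB_loop, dif_neg hij2]
      · rw [pvA_loop, dif_neg hlt, pvB_loop, dif_neg (by omega)]

-- ===== VERDICT (by name: the statement is the Claim_ definition above) =====
theorem move_file_blocks_spec : Claim_equal_move_file_blocks := by
  intro l _hdom
  unfold Spec_move_file_blocks move_file_blocks move_file_blocks_alt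
  rcases l with _ | ⟨e, r⟩
  · simp [pvA_loop, pvB_loop]
  · have hlen : 0 < (e :: r).length := by simp
    have h1 : (-1 : Int) = (((e :: r).length - 1 : Nat) : Int) - (e :: r).length := by
      push_cast [Nat.cast_sub (by omega : 1 ≤ (e :: r).length)]; ring
    rw [pvA_count_eq, h1]
    rw [pv_loop_main (e :: r).length _ _ 0 ((e :: r).length - 1) (by omega)
      (by simp) (by omega) (by intro p h1 h2; omega) (by omega) (by omega)]
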